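-- pv_equiv track=rewrite | github.com/philiplassen/My_School_Work | Web_Science/ass1/quizmaster/sim.py | is_double
-- ===== SOURCE A (Python) =====
-- def is_double(scores):
--   for k in scores.keys():
--     is_double = True
--     for j in scores.keys():
--       if scores[k] < 2 * scores[j] and k != j:
--         is_double = False
--     if is_double:
--       return True
--   return False
-- ===== SOURCE B (Python) =====
-- def is_double(scores):
--     vals = sorted(scores.values(), reverse=True)
--     if not vals:
--         return False
--     if len(vals) == 1:
--         return True
--     return vals[0] >= 2 * vals[1]
-- ===== Notes on version B (the rewrite author's own statement) =====
-- stated objective: faster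
-- what changed: Replaces the all-pairs nested key scan with one sort of the values in descending order and a single comparison of the top two (a key dominates everyone by 2x iff max >= 2*second-max; empty dict stays False, singleton True).
import Mathlib
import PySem

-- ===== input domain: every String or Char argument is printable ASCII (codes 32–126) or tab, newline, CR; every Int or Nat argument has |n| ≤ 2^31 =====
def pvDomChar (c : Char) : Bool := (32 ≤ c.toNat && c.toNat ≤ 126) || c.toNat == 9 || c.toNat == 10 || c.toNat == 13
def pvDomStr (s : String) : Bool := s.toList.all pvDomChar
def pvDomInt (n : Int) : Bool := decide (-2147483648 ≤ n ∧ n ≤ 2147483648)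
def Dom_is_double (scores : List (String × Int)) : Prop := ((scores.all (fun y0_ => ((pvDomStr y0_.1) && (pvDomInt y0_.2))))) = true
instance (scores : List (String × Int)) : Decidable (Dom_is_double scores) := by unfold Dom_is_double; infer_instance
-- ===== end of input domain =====

-- B replaces A's quadratic all-pairs key scan by one descending sort of the values
-- and a comparison of the top two (objective: faster).

-- ===== PORT A =====
-- inner 'for j in scores.keys()' loop: the flag 'is_double' for a fixed k
def is_double_inner (d : PySem.Dict String Int) (k : String) : Bool :=
  d.keys.foldl
    (fun acc j => if d.getD k 0 < 2 * d.getD j 0 ∧ k ≠ j then false else acc) true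

-- outer 'for k in scores.keys()' loop with its early 'return True'
def is_double_outer (d : PySem.Dict String Int) : List String → Bool
  | [] => false
  | k :: rest => if is_double_inner d k then true else is_double_outer d rest

def is_double (scores : List (String × Int)) : Bool :=
  is_double_outer (PySem.Dict.mk scores) (PySem.Dict.mk scores).keys

-- ===== PORT B =====
def is_double_alt (scores : List (String × Int)) : Bool :=
  let vals := PySem.List.sorted (PySem.Dict.mk scores).values (fun v => v) true
  match vals with
  | [] => false
  | [_] => true
  | a :: b :: _ => decide (2 * b ≤ a)

-- ===== PRECONDITION & SPEC =====
-- Pre_ excludes association lists with duplicate keys: they cannot arise from A's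
-- Python argument (a dict has unique keys), and lookup-by-key on them is accidental.
def Pre_is_double (scores : List (String × Int)) : Prop := (scores.map Prod.fst).Nodup
instance (scores : List (String × Int)) : Decidable (Pre_is_double scores) := by unfold Pre_is_double; infer_instance
def pvWitness_is_double : (List (String × Int)) := [("a", 4), ("b", 2), ("c", 1)]

def Spec_is_double (scores : List (String × Int)) (out : Bool) : Prop := out = is_double_alt scores
instance (scores : List (String × Int)) (out : Bool) : Decidable (Spec_is_double scores out) := by unfold Spec_is_double; infer_instance

-- ===== CLAIM (what is proved, stated in full; the proofs are below) =====
def Claim_equal_is_double : Prop := ∀ (scores : List (String × Int)), Dom_is_double scores → Pre_is_double scores → Spec_is_double scores (is_double scores)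

-- ===== LEMMAS AND PROOFS =====

-- value-level characterisation both ports are proved equivalent to:
-- some value dominates every other entry's value by 2×
def DomVal (vs : List Int) : Prop := ∃ x ∈ vs, ∀ v ∈ vs.erase x, 2 * v ≤ x

lemma foldl_guard {α : Type} (P : α → Prop) [DecidablePred P] (l : List α) (acc : Bool) :
    l.foldl (fun a j => if P j then false else a) acc = (acc && l.all (fun j => !(decide (P j)))) := by
  induction l generalizing acc with
  | nil => simp
  | cons x t ih =>
    rw [List.foldl_cons, ih]
    by_cases h : P x <;> simp [h]

lemma inner_eq_true_iff (d : PySem.Dict String Int) (k : String) :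
    is_double_inner d k = true ↔ ∀ j ∈ d.keys, ¬(d.getD k 0 < 2 * d.getD j 0 ∧ k ≠ j) := by
  unfold is_double_inner
  rw [foldl_guard, Bool.true_and, List.all_eq_true]
  simp only [Bool.not_eq_true', decide_eq_false_iff_not]

lemma outer_eq_true_iff (d : PySem.Dict String Int) (l : List String) :
    is_double_outer d l = true ↔ ∃ k ∈ l, is_double_inner d k = true := by
  induction l with
  | nil => simp [is_double_outer]
  | cons k rest ih =>
    by_cases h : is_double_inner d k = true <;> simp [is_double_outer, h, ih]

lemma map_erase_perm {α : Type} [DecidableEq α] (keys : List α) (get : α → Int) (k : α) (hk : k ∈ keys) :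
    List.Perm ((keys.map get).erase (get k)) ((keys.erase k).map get) := by
  have hperm : List.Perm (keys.map get) (get k :: (keys.erase k).map get) := (List.perm_cons_erase hk).map get
  have := hperm.erase (get k)
  simpa using this

lemma exists_dom_iff {α : Type} [DecidableEq α] (keys : List α) (get : α → Int) (hnd : keys.Nodup) :
    (∃ k ∈ keys, ∀ j ∈ keys, j ≠ k → 2 * get j ≤ get k) ↔ DomVal (keys.map get) := by
  constructor
  · rintro ⟨k, hk, h⟩
    refine ⟨get k, List.mem_map_of_mem hk, ?_⟩
    intro v hv
    have hv' : v ∈ (keys.erase k).map get := (map_erase_perm keys get k hk).mem_iff.mp hv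
    obtain ⟨j, hj, rfl⟩ := List.mem_map.mp hv'
    exact h j (List.mem_of_mem_erase hj) ((hnd.mem_erase_iff).mp hj).1
  · rintro ⟨x, hx, h⟩
    obtain ⟨k, hk, rfl⟩ := List.mem_map.mp hx
    refine ⟨k, hk, ?_⟩
    intro j hj hjk
    have : get j ∈ (keys.erase k).map get := List.mem_map_of_mem ((List.mem_erase_of_ne hjk).mpr hj)
    exact h _ ((map_erase_perm keys get k hk).mem_iff.mpr this)

lemma a_iff (scores : List (String × Int)) (h : Pre_is_double scores) :
    is_double scores = true ↔ DomVal ((PySem.Dict.mk scores).values) := by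
  have hnd : (PySem.Dict.mk scores).keys.Nodup := by
    simpa [PySem.Dict.keys_mk] using h
  rw [is_double, outer_eq_true_iff,
      PySem.Dict.values_eq_map_keys (PySem.Dict.mk scores) hnd 0,
      ← exists_dom_iff _ _ hnd]
  apply exists_congr; intro k
  apply and_congr_right; intro _
  rw [inner_eq_true_iff]
  constructor
  · intro h' j hj hjk
    by_contra hlt
    exact h' j hj ⟨by omega, hjk.symm⟩
  · rintro h' j hj ⟨hlt, hkj⟩
    exact absurd (h' j hj hkj.symm) (by omega)

lemma domval_perm {vs ws : List Int} (h : List.Perm vs ws) : DomVal vs ↔ DomVal ws := by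
  unfold DomVal
  constructor <;> rintro ⟨x, hx, hall⟩
  · exact ⟨x, h.mem_iff.mp hx, fun v hv => hall v ((h.erase x).mem_iff.mpr hv)⟩
  · exact ⟨x, h.mem_iff.mpr hx, fun v hv => hall v ((h.erase x).mem_iff.mp hv)⟩

lemma domval_desc (vs s : List Int) (hp : List.Perm s vs) (ho : s.Pairwise (fun a b => b ≤ a)) :
    DomVal vs ↔ (match s with | [] => False | [_] => True | a :: b :: _ => 2 * b ≤ a) := by
  rw [← domval_perm hp]
  match s, ho with
  | [], _ => simp [DomVal]
  | [a], _ => simp [DomVal]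
  | a :: b :: t, ho =>
    rw [List.pairwise_cons] at ho
    obtain ⟨h1, ho2⟩ := ho
    rw [List.pairwise_cons] at ho2
    obtain ⟨h2, _⟩ := ho2
    constructor
    · rintro ⟨x, hx, hall⟩
      by_cases hxa : x = a
      · subst hxa
        have := hall b (by rw [List.erase_cons_head]; exact List.mem_cons_self ..)
        simpa using this
      · have hax : a ∈ (a :: b :: t).erase x :=
          (List.mem_erase_of_ne (fun hh => hxa hh.symm)).mpr (List.mem_cons_self ..)
        have h2a := hall a hax
        have hxle : x ≤ a := h1 x (by rcases List.mem_cons.mp hx with h | h; exact absurd h hxa; exact h)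
        have hba : b ≤ a := h1 b (List.mem_cons_self ..)
        omega
    · intro hab
      refine ⟨a, List.mem_cons_self .., ?_⟩
      intro v hv
      rw [List.erase_cons_head] at hv
      rcases List.mem_cons.mp hv with rfl | hvt
      · omega
      · have := h2 v hvt; omega

lemma b_iff (scores : List (String × Int)) :
    is_double_alt scores = true ↔ DomVal ((PySem.Dict.mk scores).values) := by
  unfold is_double_alt
  have hp : List.Perm (PySem.List.sorted (PySem.Dict.mk scores).values (fun v => v) true)
      ((PySem.Dict.mk scores).values) := PySem.List.sorted_perm ..
  have ho : (PySem.List.sorted (PySem.Dict.mk scores).values (fun v => v) true).Pairwise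
      (fun a b => b ≤ a) := PySem.List.sorted_pairwise_rev ..
  rw [domval_desc _ _ hp ho]
  rcases PySem.List.sorted (PySem.Dict.mk scores).values (fun v => v) true with _ | ⟨a, _ | ⟨b, t⟩⟩ <;> simp

-- ===== VERDICT (by name: the statement is the Claim_ definition above) =====
theorem is_double_spec : Claim_equal_is_double := by
  intro scores _ hpre
  unfold Spec_is_double
  exact Bool.eq_iff_iff.mpr ((a_iff scores hpre).trans (b_iff scores).symm)
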